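-- pv_equiv track=rewrite | github.com/moi15moi/FontCollector | proof/[Symbol Font] Find unique char by ansi code page.py | generate_unique_char_by_code_page
-- ===== SOURCE A (Python) =====
-- def generate_unique_char_by_code_page(supported_char_by_code_page: dict[int, set[str]]) -> dict[int, set[str]]:
--     unique_char_by_code_page: dict[int, set[str]] = {}
--
--     for codepoint, char_set in supported_char_by_code_page.items():
--         unique_char_by_code_page[codepoint] = set(char_set)
--
--         for other_codepoint, other_char_set in supported_char_by_code_page.items():
--             if other_codepoint == codepoint:
--                 continue
--
--             unique_char_by_code_page[codepoint] -= other_char_set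
--
--     return unique_char_by_code_page
-- ===== SOURCE B (Python) =====
-- def generate_unique_char_by_code_page(supported_char_by_code_page):
--     deduped = {cp: set(cs) for cp, cs in supported_char_by_code_page.items()}
--     count = {}
--     for char_set in deduped.values():
--         for c in char_set:
--             count[c] = count.get(c, 0) + 1
--     return {cp: {c for c in cs if count[c] == 1} for cp, cs in deduped.items()}
-- ===== Notes on version B (the rewrite author's own statement) =====
-- stated objective: faster
-- what changed: Replaces the quadratic all-pairs set-subtraction loop by a single global occurrence counter over all pages, keeping per page exactly the chars whose global count is 1.
import Mathlib
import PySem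

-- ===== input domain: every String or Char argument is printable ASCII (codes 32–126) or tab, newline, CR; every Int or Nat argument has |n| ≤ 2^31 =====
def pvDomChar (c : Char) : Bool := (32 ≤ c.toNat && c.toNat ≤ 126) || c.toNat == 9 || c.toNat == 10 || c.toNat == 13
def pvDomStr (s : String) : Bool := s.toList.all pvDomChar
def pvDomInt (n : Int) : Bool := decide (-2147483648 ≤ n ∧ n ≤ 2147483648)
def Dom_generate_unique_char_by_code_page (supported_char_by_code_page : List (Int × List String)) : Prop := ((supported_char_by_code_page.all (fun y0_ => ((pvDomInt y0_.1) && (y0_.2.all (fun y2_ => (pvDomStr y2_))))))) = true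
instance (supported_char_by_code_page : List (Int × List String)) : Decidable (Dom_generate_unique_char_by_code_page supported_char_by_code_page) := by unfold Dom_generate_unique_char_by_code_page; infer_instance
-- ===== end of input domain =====

-- B replaces A's quadratic all-pairs set subtraction by one global occurrence counter
-- (a char is unique to its page iff its global count is 1); objective: faster.

-- ===== PORT A =====
-- literal transliteration of A: for each item, copy its set, then subtract every
-- other item's set ('unique[cp] -= other'; the key is always present, so getD [] is exact).
def generate_unique_char_by_code_page (supported_char_by_code_page : List (Int × List String)) : List (Int × List String) :=
  let d := PySem.Dict.ofList supported_char_by_code_page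
  let res := d.items.foldl
    (fun res p =>
      d.items.foldl
        (fun r q =>
          if q.1 == p.1 then r
          else r.insert p.1 (PySem.Set.diff (r.getD p.1 []) q.2))
        (res.insert p.1 (PySem.Set.ofList p.2)))
    (PySem.Dict.empty : PySem.Dict Int (List String))
  res.items

-- ===== PORT B =====
-- literal transliteration of B: dedupe each page, count every char globally, keep count==1.
def generate_unique_char_by_code_page_alt (supported_char_by_code_page : List (Int × List String)) : List (Int × List String) :=
  let d := PySem.Dict.ofList supported_char_by_code_page
  let deduped := d.items.map (fun p => (p.1, PySem.Set.ofList p.2))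
  let count := deduped.foldl
    (fun cnt p => p.2.foldl (fun cnt c => cnt.modify c 0 (· + 1)) cnt)
    (PySem.Dict.empty : PySem.Dict String Int)
  deduped.map (fun p => (p.1, PySem.Set.ofList (p.2.filter (fun c => count.getD c 0 == 1))))

-- ===== PRECONDITION & SPEC =====
def Spec_generate_unique_char_by_code_page (supported_char_by_code_page : List (Int × List String)) (out : List (Int × List String)) : Prop := out = generate_unique_char_by_code_page_alt supported_char_by_code_page
instance (supported_char_by_code_page : List (Int × List String)) (out : List (Int × List String)) : Decidable (Spec_generate_unique_char_by_code_page supported_char_by_code_page out) := by unfold Spec_generate_unique_char_by_code_page; infer_instance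

-- ===== CLAIM (what is proved, stated in full; the proofs are below) =====
def Claim_equal_generate_unique_char_by_code_page : Prop := ∀ (supported_char_by_code_page : List (Int × List String)), Dom_generate_unique_char_by_code_page supported_char_by_code_page → Spec_generate_unique_char_by_code_page supported_char_by_code_page (generate_unique_char_by_code_page supported_char_by_code_page)

-- ===== LEMMAS AND PROOFS =====

-- A's inner loop, lifted out of the result dict: repeated "res[k] -= other" is a fold of diffs.
theorem pv_inner_eq (L : List (Int × List String)) (res : PySem.Dict Int (List String))
    (k : Int) (v : List String) :
    L.foldl (fun r q => if q.1 == k then r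
              else r.insert k (PySem.Set.diff (r.getD k []) q.2)) (res.insert k v)
    = res.insert k (L.foldl (fun s q => if q.1 == k then s else PySem.Set.diff s q.2) v) := by
  induction L generalizing v with
  | nil => rfl
  | cons q L ih =>
      simp only [List.foldl_cons]
      by_cases h : q.1 == k
      · rw [if_pos h, if_pos h, ih]
      · rw [if_neg h, if_neg h, PySem.Dict.getD_insert_self, PySem.Dict.insert_insert_self, ih]

-- A's outer loop over fresh distinct keys appends one finished entry per item.
theorem pv_outer_items (M : List (Int × List String)) :
    ∀ (L : List (Int × List String)) (acc : PySem.Dict Int (List String)),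
    (L.map Prod.fst).Nodup → (∀ p ∈ L, acc.contains p.1 = false) →
    (L.foldl
      (fun res p =>
        M.foldl
          (fun r q => if q.1 == p.1 then r
            else r.insert p.1 (PySem.Set.diff (r.getD p.1 []) q.2))
          (res.insert p.1 (PySem.Set.ofList p.2)))
      acc).items
    = acc.items ++ L.map (fun p => (p.1,
        M.foldl (fun s q => if q.1 == p.1 then s else PySem.Set.diff s q.2) (PySem.Set.ofList p.2))) := by
  intro L
  induction L with
  | nil => simp
  | cons p L ih =>
      intro acc hnd hfresh
      simp only [List.foldl_cons]
      rw [pv_inner_eq]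
      rw [ih _ (by simpa using hnd.of_cons)]
      · rw [PySem.Dict.items_insert_of_not_contains _ _ (hfresh p (by simp))]
        simp
      · intro q hq
        rw [PySem.Dict.contains_insert]
        have h1 : (q.1 == p.1) = false := by
          simp only [List.map_cons, List.nodup_cons] at hnd
          have : q.1 ∈ L.map Prod.fst := List.mem_map_of_mem hq
          simp only [beq_eq_false_iff_ne]
          intro h; exact hnd.1 (h ▸ this)
        rw [h1, hfresh q (by simp [hq])]
        rfl

-- the fold of diffs is one filter by "in no page with another key"
theorem pv_fold_diff_eq_filter (k : Int) (L : List (Int × List String)) :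
    ∀ (s : List String),
    L.foldl (fun s q => if q.1 == k then s else PySem.Set.diff s q.2) s
    = s.filter (fun c => L.all (fun q => q.1 == k || !q.2.contains c)) := by
  induction L with
  | nil => simp
  | cons q L ih =>
      intro s
      simp only [List.foldl_cons]
      by_cases h : q.1 == k
      · rw [if_pos h, ih]
        apply List.filter_congr
        intro c _
        simp [List.all_cons, h]
      · have hf : (q.1 == k) = false := by simpa using h
        rw [if_neg h, ih]
        show (s.filter _).filter _ = _
        rw [List.filter_filter]
        apply List.filter_congr
        intro c _
        simp [List.all_cons, hf, Bool.and_comm]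

-- B's nested counting loop is the count over the concatenation of the deduped pages
theorem pv_count_eq (c : String) :
    ∀ (L : List (Int × List String)) (cnt : PySem.Dict String Int),
    (L.foldl (fun cnt p => p.2.foldl (fun cnt c => cnt.modify c 0 (· + 1)) cnt) cnt).getD c 0
    = cnt.getD c 0 + ((L.flatMap (fun p => p.2)).count c : Int) := by
  intro L
  induction L with
  | nil => simp
  | cons p L ih =>
      intro cnt
      simp only [List.foldl_cons, List.flatMap_cons, List.count_append]
      rw [ih, PySem.Dict.getD_foldl_modify_add_one]
      push_cast
      ring

-- count of c in a Nodup list is 1 or 0 by membership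
theorem pv_count_nodup {α : Type} [DecidableEq α] (l : List α) (h : l.Nodup) (c : α) :
    l.count c = if c ∈ l then 1 else 0 := by
  split_ifs with hm
  · exact List.count_eq_one_of_mem h hm
  · exact List.count_eq_zero_of_not_mem hm

-- global count over the deduped pages = number of pages containing c
theorem pv_count_flat (M : List (Int × List String)) (c : String) :
    (M.flatMap (fun p => (PySem.Set.ofList p.2 : List String))).count c
    = M.countP (fun p => p.2.contains c) := by
  induction M with
  | nil => rfl
  | cons p M ih =>
      simp only [List.flatMap_cons, List.count_append, List.countP_cons, ih]
      rw [pv_count_nodup _ (PySem.Set.nodup_ofList _) c]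
      by_cases hm : c ∈ p.2
      · simp [PySem.Set.mem_ofList, hm]
        omega
      · simp [PySem.Set.mem_ofList, hm]

-- the crux: for an entry p of an assoc list with distinct keys and c on p's page,
-- "c is on exactly one page" = "c is on no page with a key other than p.1"
theorem pv_key_equiv (M : List (Int × List String)) (hnd : (M.map Prod.fst).Nodup)
    (p : Int × List String) (hp : p ∈ M) (c : String) (hc : c ∈ p.2) :
    (M.all (fun q => q.1 == p.1 || !q.2.contains c))
    = (M.countP (fun q => q.2.contains c) == 1) := by
  have hMnd : M.Nodup := hnd.of_map
  have hinj : ∀ q ∈ M, q.1 = p.1 → q = p := fun q hq h =>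
    List.inj_on_of_nodup_map hnd hq hp h
  rw [List.countP_eq_length_filter]
  by_cases hall : ∀ q ∈ M, q.1 ≠ p.1 → c ∉ q.2
  · have hfil : M.filter (fun q => q.2.contains c) = [p] := by
      have hsub : ∀ q ∈ M.filter (fun q => q.2.contains c), q = p := by
        intro q hq
        rw [List.mem_filter] at hq
        by_contra hne
        have hk : q.1 ≠ p.1 := fun h => hne (hinj q hq.1 h)
        exact hall q hq.1 hk (by simpa using hq.2)
      have hpmem : p ∈ M.filter (fun q => q.2.contains c) := by
        rw [List.mem_filter]; exact ⟨hp, by simpa using hc⟩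
      have hnf : (M.filter (fun q => q.2.contains c)).Nodup := hMnd.filter _
      rcases hq : M.filter (fun q => q.2.contains c) with _ | ⟨x, xs⟩
      · rw [hq] at hpmem; simp at hpmem
      · rw [hq] at hsub hpmem hnf
        have hx : x = p := hsub x (by simp)
        have : xs = [] := by
          rcases xs with _ | ⟨y, ys⟩
          · rfl
          · exfalso
            have hy : y = p := hsub y (by simp)
            rw [List.nodup_cons] at hnf
            exact hnf.1 (by simp [hx, hy])
        rw [hq, hx, this]
    rw [hfil]
    simp only [List.length_cons, List.length_nil]
    have : M.all (fun q => q.1 == p.1 || !q.2.contains c) = true := by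
      rw [List.all_eq_true]
      intro q hq
      by_cases hk : q.1 = p.1
      · simp [hk]
      · simp [hk]
        exact hall q hq hk
    rw [this]
    simp
  · push Not at hall
    obtain ⟨q, hq, hqk, hqc⟩ := hall
    have h2 : 2 ≤ (M.filter (fun q => q.2.contains c)).length := by
      have hqf : q ∈ M.filter (fun q => q.2.contains c) := by
        rw [List.mem_filter]; exact ⟨hq, by simpa using hqc⟩
      have hpf : p ∈ M.filter (fun q => q.2.contains c) := by
        rw [List.mem_filter]; exact ⟨hp, by simpa using hc⟩
      have hne : p ≠ q := fun h => hqk (h ▸ rfl)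
      by_contra hlt
      push Not at hlt
      interval_cases h : (M.filter (fun q => q.2.contains c)).length
      · rw [List.length_eq_zero_iff] at h; rw [h] at hpf; simp at hpf
      · rw [List.length_eq_one_iff] at h
        obtain ⟨a, ha⟩ := h
        rw [ha] at hpf hqf
        simp at hpf hqf
        exact hne (hpf.trans hqf.symm)
    have hall : M.all (fun r => r.1 == p.1 || !r.2.contains c) = false := by
      rw [List.all_eq_false]
      refine ⟨q, hq, ?_⟩
      simp [hqk, hqc]
    rw [hall]
    have : ((M.filter (fun q => q.2.contains c)).length == 1) = false := by
      rw [beq_eq_false_iff_ne]; omega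
    rw [this]

-- set(filtered set) is itself: the filter of a dedup list is already duplicate-free
theorem pv_ofList_filter (pred : String → Bool) (l : List String) :
    PySem.Set.ofList ((PySem.Set.ofList l).filter pred) = (PySem.Set.ofList l).filter pred :=
  PySem.Set.ofList_eq_self_of_nodup _ ((PySem.Set.nodup_ofList l).filter pred)

-- ===== VERDICT (by name: the statement is the Claim_ definition above) =====
theorem generate_unique_char_by_code_page_spec : Claim_equal_generate_unique_char_by_code_page := by
  intro inp _
  unfold Spec_generate_unique_char_by_code_page
  unfold generate_unique_char_by_code_page generate_unique_char_by_code_page_alt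
  set d := PySem.Dict.ofList inp with hd
  have hnd : (d.items.map Prod.fst).Nodup := PySem.Dict.nodup_keys_ofList inp
  simp only []
  rw [pv_outer_items d.items d.items PySem.Dict.empty hnd (by intro p _; rfl)]
  rw [List.map_map]
  have hemp : (PySem.Dict.empty : PySem.Dict Int (List String)).items = [] := rfl
  rw [hemp, List.nil_append]
  apply List.map_congr_left
  intro p hp
  simp only [Function.comp]
  rw [pv_fold_diff_eq_filter]
  congr 1
  have hded : (d.items.map (fun p => (p.1, (PySem.Set.ofList p.2 : List String)))).flatMap (fun p => p.2)
      = d.items.flatMap (fun p => (PySem.Set.ofList p.2 : List String)) := by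
    rw [List.flatMap_map]
  rw [pv_ofList_filter]
  apply List.filter_congr
  intro c hcm
  have hc : c ∈ p.2 := (PySem.Set.mem_ofList _ _).1 hcm
  rw [pv_count_eq c, hded, PySem.Dict.getD_empty]
  rw [pv_count_flat, pv_key_equiv d.items hnd p hp c hc]
  norm_num
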